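-- pv_equiv track=rewrite | github.com/JiashuLiang/COACH | 2_optimization/coachopt/analysis.py | _datatype_groups
-- ===== SOURCE A (Python) =====
-- def _datatype_groups(
--     dataset_info: dict[str, dict[str, str]] | None,
--     dataset_names: list[str],
-- ) -> list[tuple[str, list[str]]]:
--     """Collect datasets grouped by Datatype in a stable order."""
--     if not dataset_info:
--         return []
--
--     datasets_by_datatype: dict[str, list[str]] = {}
--     for dataset in dataset_names:
--         datatype = dataset_info.get(dataset, {}).get("Datatype", "").strip()
--         if datatype:
--             datasets_by_datatype.setdefault(datatype, []).append(dataset)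
--     return [(datatype, datasets_by_datatype[datatype]) for datatype in sorted(datasets_by_datatype)]
-- ===== SOURCE B (Python) =====
-- def _datatype_groups(
--     dataset_info,
--     dataset_names,
-- ):
--     """Collect datasets grouped by Datatype in a stable order."""
--     if not dataset_info:
--         return []
--
--     tagged = [
--         (dataset_info.get(name, {}).get("Datatype", "").strip(), name)
--         for name in dataset_names
--     ]
--     pairs = sorted([p for p in tagged if p[0]], key=lambda p: p[0])
--     return _group_runs(pairs)
--
--
-- def _group_runs(pairs):
--     """Turn a key-sorted (datatype, dataset) pair list into grouped runs."""
--     groups = []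
--     while pairs:
--         datatype = pairs[0][0]
--         k = 1
--         while k < len(pairs) and pairs[k][0] == datatype:
--             k += 1
--         groups.append((datatype, [name for _, name in pairs[:k]]))
--         pairs = pairs[k:]
--     return groups
-- ===== Notes on version B (the rewrite author's own statement) =====
-- stated objective: alternative
-- what changed: Replaces A's incrementally-grown dict of per-datatype lists (setdefault/append, then per-key lookup over sorted keys) by a sort-then-group-runs pipeline: tag every dataset with its stripped datatype, stably sort the kept pairs by datatype, and split the sorted list into runs of equal datatype.
import Mathlib
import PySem

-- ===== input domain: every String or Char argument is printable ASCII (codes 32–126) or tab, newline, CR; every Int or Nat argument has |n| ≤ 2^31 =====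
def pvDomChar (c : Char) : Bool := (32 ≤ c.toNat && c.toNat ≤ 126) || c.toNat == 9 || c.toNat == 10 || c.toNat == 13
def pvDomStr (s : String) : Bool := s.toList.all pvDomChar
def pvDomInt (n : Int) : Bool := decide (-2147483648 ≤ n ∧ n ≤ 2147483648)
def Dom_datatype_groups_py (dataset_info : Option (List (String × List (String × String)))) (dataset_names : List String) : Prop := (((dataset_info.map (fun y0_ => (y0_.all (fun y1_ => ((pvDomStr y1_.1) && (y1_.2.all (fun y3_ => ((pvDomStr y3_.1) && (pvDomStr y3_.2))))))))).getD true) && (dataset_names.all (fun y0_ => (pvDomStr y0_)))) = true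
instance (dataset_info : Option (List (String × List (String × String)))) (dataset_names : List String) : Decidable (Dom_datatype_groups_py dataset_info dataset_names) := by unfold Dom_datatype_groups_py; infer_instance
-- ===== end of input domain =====

-- B replaces A's incrementally-grown dict of per-datatype lists by a sort-then-group-runs
-- pipeline: tag, stable-sort by datatype, split into runs (objective: alternative).

-- ===== PORT A =====
-- dataset_info.get(dataset, {}).get("Datatype", "").strip()
def pvTypeOf (info : List (String × List (String × String))) (n : String) : String :=
  PySem.Str.strip ((PySem.Dict.mk ((PySem.Dict.mk info).getD n [])).getD "Datatype" "")

def datatype_groups_py (dataset_info : Option (List (String × List (String × String)))) (dataset_names : List String) : List (String × List String) :=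
  match dataset_info with
  | none => []
  | some info =>
    if info.isEmpty then []
    else
      let d := dataset_names.foldl (fun d dataset =>
          let datatype := pvTypeOf info dataset
          if datatype ≠ "" then d.modify datatype [] (· ++ [dataset]) else d)
        PySem.Dict.empty
      (PySem.List.sorted d.keys (fun k => k) false).map (fun k => (k, d.getD k []))

-- ===== PORT B =====
-- the `while` scan of _group_runs: a run is the maximal takeWhile prefix of equal datatypes
def pvGroupRuns : List (String × String) → List (String × List String)
  | [] => []
  | (datatype, name) :: rest =>
    (datatype, name :: (rest.takeWhile (fun p => p.1 == datatype)).map (·.2)) ::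
      pvGroupRuns (rest.dropWhile (fun p => p.1 == datatype))
termination_by l => l.length
decreasing_by
  have h := List.length_dropWhile_le (p := fun p => p.1 == datatype) (l := rest)
  simp; omega

def datatype_groups_py_alt (dataset_info : Option (List (String × List (String × String)))) (dataset_names : List String) : List (String × List String) :=
  match dataset_info with
  | none => []
  | some info =>
    if info.isEmpty then []
    else
      let tagged := dataset_names.map (fun name =>
        (PySem.Str.strip ((PySem.Dict.mk ((PySem.Dict.mk info).getD name [])).getD "Datatype" ""), name))
      pvGroupRuns (PySem.List.sorted (tagged.filter (fun p => p.1 ≠ "")) (fun p => p.1) false)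

-- ===== PRECONDITION & SPEC =====
def Spec_datatype_groups_py (dataset_info : Option (List (String × List (String × String)))) (dataset_names : List String) (out : List (String × List String)) : Prop := out = datatype_groups_py_alt dataset_info dataset_names
instance (dataset_info : Option (List (String × List (String × String)))) (dataset_names : List String) (out : List (String × List String)) : Decidable (Spec_datatype_groups_py dataset_info dataset_names out) := by unfold Spec_datatype_groups_py; infer_instance

-- ===== CLAIM =====
def Claim_equal_datatype_groups_py : Prop := ∀ (dataset_info : Option (List (String × List (String × String)))) (dataset_names : List String), Dom_datatype_groups_py dataset_info dataset_names → Spec_datatype_groups_py dataset_info dataset_names (datatype_groups_py dataset_info dataset_names)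

-- ===== LEMMAS AND PROOFS =====

-- the flat list of (datatype, dataset) pairs with nonempty datatype, in order
def pvPairs (info : List (String × List (String × String))) (names : List String) : List (String × String) :=
  ((names.map (fun n => (pvTypeOf info n, n)))).filter (fun p => decide (p.1 ≠ ""))

lemma dict_fold (info : List (String × List (String × String))) :
    ∀ (names : List String) (d : PySem.Dict String (List String)),
      names.foldl (fun d dataset =>
          let datatype := pvTypeOf info dataset
          if datatype ≠ "" then d.modify datatype [] (· ++ [dataset]) else d) d
        = (pvPairs info names).foldl (fun d p => d.modify p.1 [] (· ++ [p.2])) d := by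
  intro names
  induction names with
  | nil => intro d; simp [pvPairs]
  | cons n t ih =>
    intro d
    rw [List.foldl_cons, ih]
    simp only [pvPairs, List.map_cons, List.filter_cons]
    by_cases h : pvTypeOf info n = "" <;> simp [h]

-- stability of the insertion sort under per-key filtering
lemma filter_insertBy (x : String × String) (k : String) :
    ∀ (ys : List (String × String)), ys.Pairwise (fun a b => a.1 ≤ b.1) →
    (PySem.List.insertBy (fun a b => decide (a.1 < b.1)) x ys).filter (fun p => p.1 == k)
      = if x.1 == k then ys.filter (fun p => p.1 == k) ++ [x]
        else ys.filter (fun p => p.1 == k) := by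
  intro ys
  induction ys with
  | nil =>
    intro _
    by_cases hx : x.1 == k <;> simp [PySem.List.insertBy, hx]
  | cons y t ih =>
    intro hp
    rw [List.pairwise_cons] at hp
    simp only [PySem.List.insertBy]
    by_cases hlt : decide (x.1 < y.1) = true
    · simp only [hlt, if_true]
      by_cases hx : x.1 == k
      · -- every element of y :: t has key > x.1 = k, so the filter of y :: t is empty
        have hxk : x.1 = k := by simpa using hx
        have hnil : (y :: t).filter (fun p => p.1 == k) = [] := by
          rw [List.filter_eq_nil_iff]
          intro p hpmem
          have hyp : y.1 ≤ p.1 := by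
            rcases List.mem_cons.mp hpmem with h | h
            · subst h; exact le_refl _
            · exact hp.1 p h
          have : x.1 < p.1 := lt_of_lt_of_le (by simpa using hlt) hyp
          simp only [beq_iff_eq]
          intro hc
          rw [hc] at this
          exact absurd (hxk ▸ this) (lt_irrefl k)
        simp [hx, hnil]
      · simp [hx]
    · rw [if_neg hlt]
      rw [List.filter_cons, List.filter_cons, ih hp.2]
      by_cases hx : x.1 == k <;> by_cases hy : y.1 == k <;> simp [hx, hy]

lemma filter_sorted (k : String) (xs : List (String × String)) :
    (PySem.List.sorted xs (fun p => p.1) false).filter (fun p => p.1 == k)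
      = xs.filter (fun p => p.1 == k) := by
  induction xs using List.reverseRecOn with
  | nil => simp [PySem.List.sorted]
  | append_singleton xs x ih =>
    have hstep : PySem.List.sorted (xs ++ [x]) (fun p => p.1) false
        = PySem.List.insertBy (fun a b => decide (a.1 < b.1)) x
            (PySem.List.sorted xs (fun p => p.1) false) := by
      rw [PySem.List.sorted_eq_foldl_insertBy, PySem.List.sorted_eq_foldl_insertBy,
        List.foldl_append, List.foldl_cons, List.foldl_nil]
    rw [hstep, filter_insertBy x k _ (PySem.List.sorted_pairwise xs (fun p => p.1)), ih,
      List.filter_append]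
    by_cases hx : x.1 == k <;> simp [hx]

-- first-occurrence set of a run-grouped key list
lemma foldl_add_cons (t : String) :
    ∀ (ys : List String) (acc : List String), (∀ a ∈ ys, a ≠ t) →
      ys.foldl PySem.Set.add (t :: acc) = t :: ys.foldl PySem.Set.add acc := by
  intro ys
  induction ys with
  | nil => intro acc _; rfl
  | cons y yt ih =>
    intro acc h
    have hy : y ≠ t := h y (List.mem_cons_self ..)
    have hstep : PySem.Set.add (t :: acc) y = t :: PySem.Set.add acc y := by
      simp only [PySem.Set.add, PySem.Set.contains, List.contains_cons]
      have : (y == t) = false := by simpa using hy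
      rw [this]
      by_cases hc : y ∈ acc <;> simp [hc]
    rw [List.foldl_cons, List.foldl_cons, hstep, ih _ (fun a ha => h a (List.mem_cons_of_mem _ ha))]

lemma foldl_add_const (t : String) :
    ∀ (xs : List String) (acc : List String), (∀ a ∈ xs, a = t) → t ∈ acc →
      xs.foldl PySem.Set.add acc = acc := by
  intro xs
  induction xs with
  | nil => intro acc _ _; rfl
  | cons x xt ih =>
    intro acc h hmem
    have hx : x = t := h x (List.mem_cons_self ..)
    have : PySem.Set.add acc x = acc := by
      simp only [PySem.Set.add, PySem.Set.contains]
      have hm : x ∈ acc := hx ▸ hmem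
      simp [hm]
    rw [List.foldl_cons, this, ih _ (fun a ha => h a (List.mem_cons_of_mem _ ha)) hmem]

lemma ofList_run (t : String) (xs ys : List String)
    (hxs : ∀ a ∈ xs, a = t) (hys : ∀ a ∈ ys, a ≠ t) :
    PySem.Set.ofList (t :: (xs ++ ys)) = t :: PySem.Set.ofList ys := by
  rw [PySem.Set.ofList_eq_foldl, PySem.Set.ofList_eq_foldl, List.foldl_cons, List.foldl_append]
  have h0 : PySem.Set.add [] t = [t] := rfl
  rw [h0, foldl_add_const t xs [t] hxs (List.mem_cons_self ..), foldl_add_cons t ys [] hys]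

-- keys strictly after the run are different from the run key
lemma dropWhile_ne (t : String) :
    ∀ (rest : List (String × String)), rest.Pairwise (fun a b => a.1 ≤ b.1) →
      (∀ p ∈ rest, t ≤ p.1) →
      ∀ p ∈ rest.dropWhile (fun p => p.1 == t), p.1 ≠ t := by
  intro rest
  induction rest with
  | nil => intro _ _ p hp; simp at hp
  | cons q tl ih =>
    intro hp hle
    rw [List.pairwise_cons] at hp
    by_cases hq : (q.1 == t) = true
    · rw [show List.dropWhile (fun p => p.1 == t) (q :: tl) = List.dropWhile (fun p => p.1 == t) tl from by simp [hq]]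
      exact ih hp.2 (fun p hmem => hle p (List.mem_cons_of_mem _ hmem))
    · rw [show List.dropWhile (fun p => p.1 == t) (q :: tl) = q :: tl from by simp [hq]]
      intro p hmem
      have hqt : q.1 ≠ t := by simpa using hq
      have htq : t < q.1 := lt_of_le_of_ne (hle q (List.mem_cons_self ..)) (Ne.symm hqt)
      rcases List.mem_cons.mp hmem with h | h
      · subst h; exact hqt
      · exact fun hc => absurd (hc ▸ hp.1 p h) (not_le_of_gt htq)

-- PySem.Set.ofList keeps a subsequence of its input
lemma ofList_sublist (xs : List String) : (PySem.Set.ofList xs).Sublist xs := by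
  induction xs using List.reverseRecOn with
  | nil => simp [PySem.Set.ofList]
  | append_singleton xs x ih =>
    rw [PySem.Set.ofList_eq_foldl, List.foldl_append, List.foldl_cons, List.foldl_nil,
      ← PySem.Set.ofList_eq_foldl]
    simp only [PySem.Set.add]
    by_cases hc : (PySem.Set.ofList xs).contains x = true
    · rw [if_pos hc]
      exact ih.trans (List.sublist_append_left xs [x])
    · rw [if_neg hc]
      exact List.Sublist.append ih (List.Sublist.refl _)

-- a key-sorted pair list groups into its first-occurrence keys with per-key filters
lemma groupRuns_eq :
    ∀ (l : List (String × String)), l.Pairwise (fun a b => a.1 ≤ b.1) →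
    pvGroupRuns l = (PySem.Set.ofList (l.map (·.1))).map
      (fun k => (k, (l.filter (fun p => p.1 == k)).map (·.2))) := by
  intro l
  induction l using pvGroupRuns.induct with
  | case1 => intro _; simp [pvGroupRuns, PySem.Set.ofList]
  | case2 t v rest ih =>
    intro hl
    rw [List.pairwise_cons] at hl
    obtain ⟨hle, hrest⟩ := hl
    have hsame : ∀ p ∈ rest.takeWhile (fun p => p.1 == t), p.1 = t :=
      fun p hp => by simpa using List.mem_takeWhile_imp hp
    have hother : ∀ p ∈ rest.dropWhile (fun p => p.1 == t), p.1 ≠ t :=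
      dropWhile_ne t rest hrest (fun p hp => hle p hp)
    have hofl : PySem.Set.ofList (((t, v) :: rest).map (·.1))
        = t :: PySem.Set.ofList ((rest.dropWhile (fun p => p.1 == t)).map (·.1)) := by
      have hsplitmap : ((t, v) :: rest).map (·.1)
          = t :: ((rest.takeWhile (fun p => p.1 == t)).map (·.1)
              ++ (rest.dropWhile (fun p => p.1 == t)).map (·.1)) := by
        rw [← List.map_append, List.takeWhile_append_dropWhile, List.map_cons]
      rw [hsplitmap]
      exact ofList_run t _ _
        (fun a ha => by obtain ⟨p, hp, rfl⟩ := List.mem_map.mp ha; exact hsame p hp)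
        (fun a ha => by obtain ⟨p, hp, rfl⟩ := List.mem_map.mp ha; exact hother p hp)
    have hrestsplit : rest.filter (fun p => p.1 == t) = rest.takeWhile (fun p => p.1 == t) := by
      conv_lhs => rw [← List.takeWhile_append_dropWhile (p := fun p => p.1 == t) (l := rest)]
      rw [List.filter_append, List.filter_eq_self.mpr (fun (p : String × String) hp => List.mem_takeWhile_imp hp),
        List.filter_eq_nil_iff.mpr (fun p hp => by simpa using hother p hp), List.append_nil]
    have hfiltt : (((t, v) :: rest)).filter (fun p => p.1 == t)
        = (t, v) :: rest.takeWhile (fun p => p.1 == t) := by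
      rw [List.filter_cons, if_pos (by simp), hrestsplit]
    have hfiltk : ∀ k, k ≠ t → (((t, v) :: rest)).filter (fun p => p.1 == k)
        = (rest.dropWhile (fun p => p.1 == t)).filter (fun p => p.1 == k) := by
      intro k hk
      rw [List.filter_cons, if_neg (by simpa using Ne.symm hk)]
      conv_lhs => rw [← List.takeWhile_append_dropWhile (p := fun p => p.1 == t) (l := rest)]
      rw [List.filter_append,
        List.filter_eq_nil_iff.mpr (fun p hp => by simp [hsame p hp, Ne.symm hk]),
        List.nil_append]
    rw [pvGroupRuns, hofl, List.map_cons]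
    have hpw : (rest.dropWhile (fun p => p.1 == t)).Pairwise (fun a b => a.1 ≤ b.1) :=
      List.Pairwise.sublist (List.dropWhile_sublist _) hrest
    rw [ih hpw]
    congr 1
    · rw [hfiltt, List.map_cons]
    · apply List.map_congr_left
      intro k hkmem
      have hk : k ≠ t := by
        obtain ⟨p, hp, rfl⟩ := List.mem_map.mp ((PySem.Set.mem_ofList _ _).mp hkmem)
        exact hother p hp
      rw [hfiltk k hk]

-- sorted distinct keys of the flat pairs, in both readings
lemma keys_eq (pairs : List (String × String)) :
    PySem.Set.ofList ((PySem.List.sorted pairs (fun p => p.1) false).map (·.1))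
      = PySem.List.sorted (PySem.Set.ofList (pairs.map (·.1))) (fun k => k) false := by
  symm
  apply PySem.List.sorted_id_eq_of_perm_of_pairwise
  · apply (List.perm_ext_iff_of_nodup (PySem.Set.nodup_ofList _) (PySem.Set.nodup_ofList _)).mpr
    intro a
    rw [PySem.Set.mem_ofList, PySem.Set.mem_ofList]
    exact (List.Perm.map (·.1) (PySem.List.sorted_perm pairs (fun p => p.1) false)).mem_iff
  · exact List.Pairwise.sublist (ofList_sublist _) (PySem.List.sorted_map_key_pairwise pairs (fun p => p.1))

-- ===== VERDICT =====
theorem datatype_groups_py_spec : Claim_equal_datatype_groups_py := by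
  intro dataset_info dataset_names _
  unfold Spec_datatype_groups_py datatype_groups_py datatype_groups_py_alt
  match dataset_info with
  | none => rfl
  | some info =>
    by_cases hemp : info.isEmpty
    · simp [hemp]
    · simp only [hemp, if_false, Bool.false_eq_true]
      rw [dict_fold]
      have hpairs : (dataset_names.map (fun name =>
            (PySem.Str.strip ((PySem.Dict.mk ((PySem.Dict.mk info).getD name [])).getD "Datatype" ""), name))).filter
            (fun p => p.1 ≠ "") = pvPairs info dataset_names := rfl
      rw [hpairs, groupRuns_eq _ (PySem.List.sorted_pairwise _ _), keys_eq]
      have hkeys : ((pvPairs info dataset_names).foldl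
          (fun d p => d.modify p.1 [] (· ++ [p.2])) PySem.Dict.empty).keys
          = PySem.Set.ofList ((pvPairs info dataset_names).map (·.1)) := by
        rw [PySem.Dict.keys_foldl_modify_key]
        simp [PySem.Set.update_nil_left, PySem.Dict.keys_empty]
      rw [hkeys]
      apply List.map_congr_left
      intro k _
      rw [PySem.Dict.getD_foldl_modify_append, filter_sorted]
      simp [PySem.Dict.getD_empty]
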